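-- pv_equiv track=rewrite | github.com/lys7aves/LawAkinator | src/QNAService.py | highRatioPrecedents
-- ===== SOURCE A (Python) =====
-- def highRatioPrecedents(P, R):
-- 	sortedIdx = sorted(range(len(P)), key=lambda i:P[i], reverse=True)
--
-- 	idx = []
-- 	for i in range(len(P)):
-- 		idx.append(sortedIdx[i])
-- 		R = R-P[sortedIdx[i]]
--
-- 		if R <= 0:
-- 			break
--
-- 	return idx
-- ===== SOURCE B (Python) =====
-- import heapq
--
-- def highRatioPrecedents(P, R):
-- 	heap = [(-p, i) for i, p in enumerate(P)]
-- 	heapq.heapify(heap)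
--
-- 	idx = []
-- 	while heap:
-- 		negp, i = heapq.heappop(heap)
-- 		idx.append(i)
-- 		R = R + negp
--
-- 		if R <= 0:
-- 			break
--
-- 	return idx
-- ===== Notes on version B (the rewrite author's own statement) =====
-- stated objective: alternative
-- what changed: A sorts all indices by P descending and then scans the sorted prefix; B builds a heap of (-P[i], i) tuples (heapify, O(n)) and lazily heappops minima, subtracting each popped value from R and stopping when R <= 0, so only the popped prefix is ever ordered.
import Mathlib
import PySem

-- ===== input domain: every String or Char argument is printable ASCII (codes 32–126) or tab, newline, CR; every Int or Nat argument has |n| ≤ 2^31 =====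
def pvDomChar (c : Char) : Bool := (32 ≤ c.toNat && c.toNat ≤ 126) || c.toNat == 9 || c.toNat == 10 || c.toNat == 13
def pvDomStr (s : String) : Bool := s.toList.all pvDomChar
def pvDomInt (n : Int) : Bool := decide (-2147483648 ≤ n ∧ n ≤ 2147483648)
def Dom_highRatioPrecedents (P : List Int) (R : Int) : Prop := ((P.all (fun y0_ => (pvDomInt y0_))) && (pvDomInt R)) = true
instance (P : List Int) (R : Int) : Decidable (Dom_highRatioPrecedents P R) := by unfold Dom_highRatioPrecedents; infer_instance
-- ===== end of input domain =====

-- B replaces A's full sort-then-scan by repeated extract-min of (-P[i], i) tuples (a heap in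
-- Python), stopping as soon as the budget R is exhausted; objective: alternative.


-- ===== PORT A =====
-- 'for i in range(len(P)): idx.append(sortedIdx[i]); R = R - P[sortedIdx[i]]; if R <= 0: break'
-- transliterated as structural recursion over sortedIdx (the loop reads sortedIdx[0..] in order).
def hrpLoop (P : List Int) (R : Int) : List Int → List Int
  | [] => []
  | j :: rest =>
    if R - PySem.List.pyGetD P j 0 ≤ 0 then [j]
    else j :: hrpLoop P (R - PySem.List.pyGetD P j 0) rest

def highRatioPrecedents (P : List Int) (R : Int) : List Int :=
  -- sortedIdx = sorted(range(len(P)), key=lambda i: P[i], reverse=True)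
  hrpLoop P R (PySem.List.sorted (PySem.List.pyRange 0 (P.length : Int) 1)
                (fun i => PySem.List.pyGetD P i 0) true)

-- ===== PORT B =====
-- heap = [(-p, i) for i, p in enumerate(P)]
def altPairs (P : List Int) : List (Int × Int) :=
  (PySem.List.enumerate P 0).map (fun ip => (-ip.2, ip.1))

-- pvMinFold m t = the minimum tuple of m :: t (lexicographic, first occurrence);
-- used only to prove membership of min2?'s result, which altLoop's termination needs.
def pvMinFold (m : Int × Int) : List (Int × Int) → Int × Int
  | [] => m
  | x :: t => if x.1 < m.1 ∨ (x.1 ≤ m.1 ∧ x.2 < m.2) then pvMinFold x t else pvMinFold m t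

theorem pv_min2?_cons_cons (m x : Int × Int) (t : List (Int × Int)) :
    PySem.List.min2? (m :: x :: t) (fun a => a.1) (fun a => a.2) =
      if x.1 < m.1 ∨ (x.1 ≤ m.1 ∧ x.2 < m.2)
      then PySem.List.min2? (x :: t) (fun a => a.1) (fun a => a.2)
      else PySem.List.min2? (m :: t) (fun a => a.1) (fun a => a.2) := by
  by_cases hC : x.1 < m.1 ∨ (x.1 ≤ m.1 ∧ x.2 < m.2)
  · rw [if_pos hC]
    have hB : (decide (x.1 < m.1) || !decide (m.1 < x.1) && decide (x.2 < m.2)) = true := by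
      by_cases h2 : m.1 < x.1 <;> by_cases h3 : x.2 < m.2 <;> simp [h2, h3] <;> omega
    simp [PySem.List.min2?, List.foldl, hB]
  · rw [if_neg hC]
    have hB : (decide (x.1 < m.1) || !decide (m.1 < x.1) && decide (x.2 < m.2)) = false := by
      by_cases h2 : m.1 < x.1 <;> by_cases h3 : x.2 < m.2 <;> simp [h2, h3] <;> omega
    simp [PySem.List.min2?, List.foldl, hB]

theorem pv_min2?_eq_minFold (t : List (Int × Int)) :
    ∀ m, PySem.List.min2? (m :: t) (fun a => a.1) (fun a => a.2) = some (pvMinFold m t) := by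
  induction t with
  | nil => intro m; rfl
  | cons x t ih =>
    intro m
    rw [pv_min2?_cons_cons]
    by_cases hc : x.1 < m.1 ∨ (x.1 ≤ m.1 ∧ x.2 < m.2) <;> simp [pvMinFold, hc, ih]

theorem pv_minFold_mem (t : List (Int × Int)) :
    ∀ m, pvMinFold m t = m ∨ pvMinFold m t ∈ t := by
  induction t with
  | nil => intro m; left; rfl
  | cons x t ih =>
    intro m
    by_cases hc : x.1 < m.1 ∨ (x.1 ≤ m.1 ∧ x.2 < m.2)
    · rcases ih x with h | h <;> simp [pvMinFold, hc, h]
    · rcases ih m with h | h <;> simp [pvMinFold, hc, h]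

theorem pv_min2?_mem {h : List (Int × Int)} {m : Int × Int}
    (hm : PySem.List.min2? h (fun a => a.1) (fun a => a.2) = some m) : m ∈ h := by
  cases h with
  | nil => simp [PySem.List.min2?] at hm
  | cons x t =>
    rw [pv_min2?_eq_minFold] at hm
    rcases pv_minFold_mem t x with h | h <;> simp_all

def altLoop (R : Int) (h : List (Int × Int)) : List Int :=
  -- while heap: negp, i = heappop(heap); idx.append(i); R = R + negp; if R <= 0: break
  match hm : PySem.List.min2? h (fun a => a.1) (fun a => a.2) with
  | none => []
  | some m =>
    if R + m.1 ≤ 0 then [m.2]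
    else m.2 :: altLoop (R + m.1) (h.erase m)
termination_by h.length
decreasing_by
  have hmem : m ∈ h := pv_min2?_mem hm
  have h1 := List.length_erase_of_mem hmem
  have h2 : 1 ≤ h.length := List.length_pos_of_mem hmem
  omega

def highRatioPrecedents_alt (P : List Int) (R : Int) : List Int :=
  altLoop R (altPairs P)

-- ===== PRECONDITION & SPEC =====
def Spec_highRatioPrecedents (P : List Int) (R : Int) (out : List Int) : Prop := out = highRatioPrecedents_alt P R
instance (P : List Int) (R : Int) (out : List Int) : Decidable (Spec_highRatioPrecedents P R out) := by unfold Spec_highRatioPrecedents; infer_instance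

-- ===== CLAIM (what is proved, stated in full; the proofs are below) =====
def Claim_equal_highRatioPrecedents : Prop := ∀ (P : List Int) (R : Int), Dom_highRatioPrecedents P R → Spec_highRatioPrecedents P R (highRatioPrecedents P R)

-- ===== LEMMAS AND PROOFS =====

-- lexicographic ≤ on tuples; the order heappop follows
def pvRle (a b : Int × Int) : Prop := a.1 < b.1 ∨ (a.1 = b.1 ∧ a.2 ≤ b.2)

-- the order A's stable reverse sort puts indices in: P-value descending, ties by index
def pvQ (P : List Int) (i j : Int) : Prop :=
  PySem.List.pyGetD P j 0 < PySem.List.pyGetD P i 0 ∨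
    (PySem.List.pyGetD P i 0 = PySem.List.pyGetD P j 0 ∧ i < j)

def pvF (P : List Int) (j : Int) : Int × Int := (-(PySem.List.pyGetD P j 0), j)

-- the sequence of tuples popped by B, ignoring the budget
def popSeq (h : List (Int × Int)) : List (Int × Int) :=
  match hm : PySem.List.min2? h (fun a => a.1) (fun a => a.2) with
  | none => []
  | some m => m :: popSeq (h.erase m)
termination_by h.length
decreasing_by
  have hmem : m ∈ h := pv_min2?_mem hm
  have h1 := List.length_erase_of_mem hmem
  have h2 : 1 ≤ h.length := List.length_pos_of_mem hmem
  omega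

-- B's loop over the popped tuples, with the budget
def pairLoop (R : Int) : List (Int × Int) → List Int
  | [] => []
  | m :: t => if R + m.1 ≤ 0 then [m.2] else m.2 :: pairLoop (R + m.1) t

theorem altLoop_none (R : Int) (h : List (Int × Int))
    (hm : PySem.List.min2? h (fun a => a.1) (fun a => a.2) = none) : altLoop R h = [] := by
  rw [altLoop.eq_def]; split <;> simp_all

theorem altLoop_some (R : Int) (h : List (Int × Int)) (m : Int × Int)
    (hm : PySem.List.min2? h (fun a => a.1) (fun a => a.2) = some m) :
    altLoop R h = if R + m.1 ≤ 0 then [m.2] else m.2 :: altLoop (R + m.1) (h.erase m) := by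
  rw [altLoop.eq_def]; split <;> simp_all

theorem popSeq_none (h : List (Int × Int))
    (hm : PySem.List.min2? h (fun a => a.1) (fun a => a.2) = none) : popSeq h = [] := by
  rw [popSeq.eq_def]; split <;> simp_all

theorem popSeq_some (h : List (Int × Int)) (m : Int × Int)
    (hm : PySem.List.min2? h (fun a => a.1) (fun a => a.2) = some m) :
    popSeq h = m :: popSeq (h.erase m) := by
  rw [popSeq.eq_def]; split <;> simp_all

theorem altLoop_eq_pairLoop (R : Int) (h : List (Int × Int)) :
    altLoop R h = pairLoop R (popSeq h) := by
  induction R, h using altLoop.induct with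
  | case1 R h hm => rw [altLoop_none R h hm, popSeq_none h hm]; rfl
  | case2 R h m hm hle =>
    rw [altLoop_some R h m hm, popSeq_some h m hm]
    simp [pairLoop, hle]
  | case3 R h m hm hle ih =>
    rw [altLoop_some R h m hm, popSeq_some h m hm]
    simp [pairLoop, hle, ih]

theorem pv_minFold_min (t : List (Int × Int)) :
    ∀ m, pvRle (pvMinFold m t) m ∧ ∀ y ∈ t, pvRle (pvMinFold m t) y := by
  induction t with
  | nil => intro m; exact ⟨Or.inr ⟨rfl, le_refl _⟩, by simp⟩
  | cons x t ih =>
    intro m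
    by_cases hc : x.1 < m.1 ∨ (x.1 ≤ m.1 ∧ x.2 < m.2)
    · have hx := ih x
      have hxm : pvRle x m := by unfold pvRle; omega
      have hmin : pvRle (pvMinFold x t) m := by
        rcases hx.1 with h | h <;> rcases hxm with h' | h' <;> unfold pvRle <;> omega
      refine ⟨by simp [pvMinFold, hc, hmin], ?_⟩
      intro y hy
      rcases List.mem_cons.1 hy with rfl | hy
      · simp [pvMinFold, hc, hx.1]
      · simp [pvMinFold, hc, hx.2 y hy]
    · have hm := ih m
      have hxm : pvRle m x := by unfold pvRle; omega
      refine ⟨by simp [pvMinFold, hc, hm.1], ?_⟩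
      intro y hy
      rcases List.mem_cons.1 hy with rfl | hy
      · have : pvRle (pvMinFold m t) y := by
          rcases hm.1 with h | h <;> rcases hxm with h' | h' <;> unfold pvRle <;> omega
        simp [pvMinFold, hc, this]
      · simp [pvMinFold, hc, hm.2 y hy]

theorem pv_min2?_min {h : List (Int × Int)} {m : Int × Int}
    (hm : PySem.List.min2? h (fun a => a.1) (fun a => a.2) = some m) :
    ∀ y ∈ h, pvRle m y := by
  cases h with
  | nil => simp [PySem.List.min2?] at hm
  | cons x t =>
    rw [pv_min2?_eq_minFold] at hm
    have hmf := pv_minFold_min t x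
    injection hm with hm'
    subst hm'
    intro y hy
    rcases List.mem_cons.1 hy with rfl | hy
    · exact hmf.1
    · exact hmf.2 y hy

theorem pv_min2?_none {h : List (Int × Int)}
    (hm : PySem.List.min2? h (fun a => a.1) (fun a => a.2) = none) : h = [] := by
  cases h with
  | nil => rfl
  | cons x t => rw [pv_min2?_eq_minFold] at hm; cases hm

theorem popSeq_perm (h : List (Int × Int)) : (popSeq h).Perm h := by
  induction h using popSeq.induct with
  | case1 h hm => rw [popSeq_none h hm, pv_min2?_none hm]
  | case2 h m hm ih =>
    rw [popSeq_some h m hm]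
    exact ((ih.cons m).trans (List.perm_cons_erase (pv_min2?_mem hm)).symm)

theorem popSeq_pairwise (h : List (Int × Int)) : (popSeq h).Pairwise pvRle := by
  induction h using popSeq.induct with
  | case1 h hm => rw [popSeq_none h hm]; exact List.Pairwise.nil
  | case2 h m hm ih =>
    rw [popSeq_some h m hm]
    refine List.pairwise_cons.2 ⟨?_, ih⟩
    intro y hy
    have : y ∈ h.erase m := (popSeq_perm _).mem_iff.1 hy
    exact pv_min2?_min hm y (List.mem_of_mem_erase this)

-- stability of Python's reverse sort: inserting x (a larger index than everything in acc)
-- keeps acc ordered by (P-value descending, index ascending)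
theorem pv_insertBy_pw (P : List Int) (x : Int) (acc : List Int)
    (h1 : acc.Pairwise (pvQ P)) (h2 : ∀ a ∈ acc, a < x) :
    (PySem.List.insertBy
        (fun a b => decide (PySem.List.pyGetD P b 0 < PySem.List.pyGetD P a 0)) x acc).Pairwise
      (pvQ P) := by
  induction acc with
  | nil => simp [PySem.List.insertBy]
  | cons y ys ih =>
    rw [List.pairwise_cons] at h1
    obtain ⟨hy, hys⟩ := h1
    by_cases hb : PySem.List.pyGetD P y 0 < PySem.List.pyGetD P x 0
    · rw [PySem.List.insertBy]; simp only [hb, decide_true, if_pos]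
      refine List.pairwise_cons.2 ⟨?_, List.pairwise_cons.2 ⟨hy, hys⟩⟩
      intro z hz
      rcases List.mem_cons.1 hz with rfl | hz
      · exact Or.inl hb
      · have := hy z hz
        unfold pvQ at this ⊢; omega
    · rw [PySem.List.insertBy]; simp only [hb, decide_false, if_neg, Bool.false_eq_true,
        not_false_eq_true]
      have hrec := ih hys (fun a ha => h2 a (List.mem_cons_of_mem _ ha))
      refine List.pairwise_cons.2 ⟨?_, hrec⟩
      intro z hz
      rcases (PySem.List.mem_insertBy _ _ _ _).1 hz with rfl | hz
      · have hyx : y < z := h2 y (List.mem_cons_self)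
        unfold pvQ; omega
      · exact hy z hz

theorem pv_foldl_insert_pw (P : List Int) :
    ∀ (xs acc : List Int), acc.Pairwise (pvQ P) → (∀ a ∈ acc, ∀ x ∈ xs, a < x) →
      xs.Pairwise (· < ·) →
      (xs.foldl (fun acc x =>
          PySem.List.insertBy
            (fun a b => decide (PySem.List.pyGetD P b 0 < PySem.List.pyGetD P a 0)) x acc)
        acc).Pairwise (pvQ P) := by
  intro xs
  induction xs with
  | nil => intro acc h1 _ _; simpa using h1
  | cons x t ih =>
    intro acc h1 h2 h3
    rw [List.pairwise_cons] at h3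
    simp only [List.foldl_cons]
    apply ih
    · exact pv_insertBy_pw P x acc h1 (fun a ha => h2 a ha x List.mem_cons_self)
    · intro a ha x' hx'
      rcases (PySem.List.mem_insertBy _ _ _ _).1 ha with rfl | ha
      · exact h3.1 x' hx'
      · exact h2 a ha x' (List.mem_cons_of_mem _ hx')
    · exact h3.2

theorem pv_sorted_pairwise (P : List Int) :
    (PySem.List.sorted (PySem.List.pyRange 0 (P.length : Int) 1)
        (fun i => PySem.List.pyGetD P i 0) true).Pairwise (pvQ P) := by
  rw [PySem.List.sorted_rev_eq_foldl_insertBy]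
  exact pv_foldl_insert_pw P _ [] (by simp) (by simp) (PySem.List.pairwise_lt_pyRange_one 0 _)

theorem pv_altPairs_eq (P : List Int) :
    altPairs P = (PySem.List.pyRange 0 (P.length : Int) 1).map (pvF P) := by
  unfold altPairs
  rw [PySem.List.enumerate_eq_map_pyRange (d := 0)]
  simp [List.map_map, pvF, Function.comp_def]

theorem popSeq_altPairs (P : List Int) :
    popSeq (altPairs P) =
      (PySem.List.sorted (PySem.List.pyRange 0 (P.length : Int) 1)
        (fun i => PySem.List.pyGetD P i 0) true).map (pvF P) := by
  apply List.Perm.eq_of_pairwise (le := pvRle)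
  · intro a b _ _ hab hba
    unfold pvRle at hab hba
    have h1 : a.1 = b.1 := by omega
    have h2 : a.2 = b.2 := by omega
    exact Prod.ext h1 h2
  · exact popSeq_pairwise _
  · refine List.pairwise_map.2 ?_
    refine (pv_sorted_pairwise P).imp ?_
    intro i j hij
    unfold pvQ at hij; unfold pvRle pvF; omega
  · refine (popSeq_perm _).trans ?_
    rw [pv_altPairs_eq]
    exact ((PySem.List.sorted_perm _ _ _).map (pvF P)).symm

theorem pairLoop_map (P : List Int) (s : List Int) :
    ∀ R, pairLoop R (s.map (pvF P)) = hrpLoop P R s := by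
  induction s with
  | nil => intro R; rfl
  | cons j t ih =>
    intro R
    simp only [List.map_cons, pairLoop, hrpLoop, pvF]
    rw [show R + -(PySem.List.pyGetD P j 0) = R - PySem.List.pyGetD P j 0 by ring]
    rw [ih]

-- ===== VERDICT (by name: the statement is the Claim_ definition above) =====
theorem highRatioPrecedents_spec : Claim_equal_highRatioPrecedents := by
  intro P R _
  unfold Spec_highRatioPrecedents highRatioPrecedents highRatioPrecedents_alt
  rw [altLoop_eq_pairLoop, popSeq_altPairs, pairLoop_map]
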